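-- pv_equiv track=rewrite | github.com/ciprik13/CS-LABS | LAB 3/3.1.py | split_into_pairs
-- ===== SOURCE A (Python) =====
-- def split_into_pairs(text):
--     pairs = []
--     i = 0
--
--     while i < len(text):
--         if i == len(text) - 1:
--             pairs.append(text[i] + 'X')
--             i += 1
--         elif text[i] == text[i + 1]:
--             pairs.append(text[i] + 'X')
--             i += 1
--         else:
--             pairs.append(text[i] + text[i + 1])
--             i += 2
--
--     return pairs
-- ===== SOURCE B (Python) =====
-- def split_into_pairs(text):
--     pairs = []
--     pending = None
--     for c in text:
--         if pending is None:
--             pending = c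
--         elif pending == c:
--             pairs.append(pending + 'X')
--             pending = c
--         else:
--             pairs.append(pending + c)
--             pending = None
--     if pending is not None:
--         pairs.append(pending + 'X')
--     return pairs
-- ===== Notes on version B (the rewrite author's own statement) =====
-- stated objective: alternative
-- what changed: Replaced the index-based while loop with variable step (i+=1 / i+=2) and look-ahead text[i+1] by a single streaming for-loop over characters that keeps one buffered character and flushes it after the loop.
import Mathlib
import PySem

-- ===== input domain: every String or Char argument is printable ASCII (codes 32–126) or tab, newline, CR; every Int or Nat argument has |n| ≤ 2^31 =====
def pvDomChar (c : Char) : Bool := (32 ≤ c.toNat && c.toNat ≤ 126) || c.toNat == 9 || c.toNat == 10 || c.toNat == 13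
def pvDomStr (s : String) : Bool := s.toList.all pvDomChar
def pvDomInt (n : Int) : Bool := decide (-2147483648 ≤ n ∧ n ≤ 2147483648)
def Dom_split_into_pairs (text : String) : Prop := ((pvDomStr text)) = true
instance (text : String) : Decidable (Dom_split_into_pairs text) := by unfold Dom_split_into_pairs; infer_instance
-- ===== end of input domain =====

-- B replaces A's index-based while loop with look-ahead by a single streaming fold
-- over the characters keeping one buffered buffered character (alternative decomposition).


-- ===== PORT A =====
-- A's while loop advances an index i by 1 or 2 depending on a look-ahead at i+1;
-- ported as structural recursion on the suffix of characters starting at i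
-- (i == len-1 ↔ exactly one char left; text[i] == text[i+1] ↔ the first two chars equal).
def splitA : List Char → List String
  | [] => []
  | [c] => [String.mk [c, 'X']]
  | c :: d :: rest =>
    if c == d then String.mk [c, 'X'] :: splitA (d :: rest)
    else String.mk [c, d] :: splitA rest

def split_into_pairs (text : String) : List String := splitA text.toList

-- ===== PORT B =====
-- one streaming pass: fold over the chars with state (pairs so far, buffered char), flush at the end
def stepB (st : List String × Option Char) (c : Char) : List String × Option Char :=
  match st.2 with
  | none => (st.1, some c)
  | some p =>
    if p == c then (st.1 ++ [String.mk [p, 'X']], some c)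
    else (st.1 ++ [String.mk [p, c]], none)

def split_into_pairs_alt (text : String) : List String :=
  let st := text.toList.foldl stepB ([], none)
  match st.2 with
  | none => st.1
  | some p => st.1 ++ [String.mk [p, 'X']]

-- ===== PRECONDITION & SPEC =====
def Spec_split_into_pairs (text : String) (out : List String) : Prop := out = split_into_pairs_alt text
instance (text : String) (out : List String) : Decidable (Spec_split_into_pairs text out) := by unfold Spec_split_into_pairs; infer_instance

-- ===== CLAIM (what is proved, stated in full; the proofs are below) =====
def Claim_equal_split_into_pairs : Prop := ∀ (text : String), Dom_split_into_pairs text → Spec_split_into_pairs text (split_into_pairs text)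

-- ===== LEMMAS AND PROOFS =====

def flushB (st : List String × Option Char) : List String :=
  match st.2 with
  | none => st.1
  | some p => st.1 ++ [String.mk [p, 'X']]

def optCons : Option Char → List Char → List Char
  | none, l => l
  | some p, l => p :: l

theorem foldB_eq_splitA (l : List Char) : ∀ (acc : List String) (pend : Option Char),
    flushB (l.foldl stepB (acc, pend)) = acc ++ splitA (optCons pend l) := by
  induction l with
  | nil =>
    intro acc pend
    cases pend <;> simp [flushB, optCons, splitA]
  | cons c rest ih =>
    intro acc pend
    cases pend with
    | none =>
      simpa [List.foldl, stepB, optCons] using ih acc (some c)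
    | some p =>
      by_cases h : p = c
      · subst h
        simp only [List.foldl, stepB, BEq.rfl, if_pos]
        rw [ih]
        simp [optCons, splitA]
      · have hb : (p == c) = false := by simp [h]
        simp only [List.foldl, stepB, hb, Bool.false_eq_true, if_false]
        rw [ih]
        simp [optCons, splitA, h]

-- ===== VERDICT (by name: the statement is the Claim_ definition above) =====
theorem split_into_pairs_spec : Claim_equal_split_into_pairs := by
  intro text _
  unfold Spec_split_into_pairs split_into_pairs split_into_pairs_alt
  have := foldB_eq_splitA text.toList [] none
  simp [flushB, optCons] at this
  cases h : (text.toList.foldl stepB ([], none)).2 <;>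
    simp_all [flushB]
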